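-- pv_equiv track=rewrite | github.com/PySean/prob51 | pro51helpers.py | tempgen
-- ===== SOURCE A (Python) =====
-- def tempgen(ll, num=0):
--     if len(ll) == 0:
--         if num == 0:
--             return []
--         return [num]
--     temps = []
--     if ll[0] > -1:
--         slat = 10 ** (len(ll) - 1)
--         temps += tempgen(ll[1:], slat + num)
--
--     temps += tempgen(ll[1:], num)
--     return temps
-- ===== SOURCE B (Python) =====
-- def tempgen(ll, num=0):
--     n = len(ll)
--     weights = [10 ** (n - 1 - i) for i in range(n) if ll[i] > -1]
--     totals = [num]
--     for w in reversed(weights):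
--         totals = [t + w for t in totals] + totals
--     return [t for t in totals if t != 0]
-- ===== Notes on version B (the rewrite author's own statement) =====
-- stated objective: alternative
-- what changed: Replaces A's include/exclude recursion with an iterative scheme: precompute the eligible place-value weights, fold them (rightmost first) into a list of all subset totals in A's DFS order, then filter out zero totals.
import Mathlib
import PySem

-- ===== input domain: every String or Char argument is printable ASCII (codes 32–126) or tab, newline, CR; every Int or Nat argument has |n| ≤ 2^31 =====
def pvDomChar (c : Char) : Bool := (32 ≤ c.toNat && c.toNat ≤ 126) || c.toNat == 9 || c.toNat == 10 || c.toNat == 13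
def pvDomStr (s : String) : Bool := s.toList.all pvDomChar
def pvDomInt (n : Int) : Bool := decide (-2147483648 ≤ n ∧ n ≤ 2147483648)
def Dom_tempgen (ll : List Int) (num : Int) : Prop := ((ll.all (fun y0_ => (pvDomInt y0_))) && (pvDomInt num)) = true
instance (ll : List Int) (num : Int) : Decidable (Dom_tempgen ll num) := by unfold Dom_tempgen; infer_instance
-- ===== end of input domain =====

-- B replaces A's include/exclude recursion by a precomputed list of eligible
-- place-value weights folded into an iteratively built list of totals
-- (different decomposition, same cost class).

-- ===== PORT A =====
def tempgen (ll : List Int) (num : Int) : List Int :=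
  match ll with
  | [] => if num = 0 then [] else [num]
  | x :: rest =>
    let temps : List Int :=
      if x > -1 then
        let slat : Int := (10 : Int) ^ ((x :: rest).length - 1)
        tempgen rest (slat + num)
      else []
    temps ++ tempgen rest num

-- ===== PORT B =====
def tempgen_alt (ll : List Int) (num : Int) : List Int :=
  let n := ll.length
  let weights : List Int :=
    ((List.range n).filter (fun i => ll.getD i 0 > -1)).map (fun i => (10 : Int) ^ (n - 1 - i))
  let totals := weights.reverse.foldl (fun ts w => ts.map (fun t => t + w) ++ ts) [num]
  totals.filter (fun t => t ≠ 0)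

-- ===== PRECONDITION & SPEC =====
def Spec_tempgen (ll : List Int) (num : Int) (out : List Int) : Prop := out = tempgen_alt ll num
instance (ll : List Int) (num : Int) (out : List Int) : Decidable (Spec_tempgen ll num out) := by unfold Spec_tempgen; infer_instance

-- ===== CLAIM (what is proved, stated in full; the proofs are below) =====
def Claim_equal_tempgen : Prop := ∀ (ll : List Int) (num : Int), Dom_tempgen ll num → Spec_tempgen ll num (tempgen ll num)

-- ===== LEMMAS AND PROOFS =====

/-- B's loop body, named for the proofs. -/
def pvStep (ts : List Int) (w : Int) : List Int := ts.map (fun t => t + w) ++ ts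

/-- B's weight table, named for the proofs. -/
def pvWts (ll : List Int) : List Int :=
  ((List.range ll.length).filter (fun i => ll.getD i 0 > -1)).map
    (fun i => (10 : Int) ^ (ll.length - 1 - i))

/-- All subset totals, in A's order, without the zero filter. -/
def pvTot : List Int → Int → List Int
  | [], num => [num]
  | x :: rest, num =>
    (if x > -1 then pvTot rest ((10 : Int) ^ rest.length + num) else []) ++ pvTot rest num

theorem pvWts_cons (x : Int) (rest : List Int) :
    pvWts (x :: rest) =
      (if x > -1 then [(10 : Int) ^ rest.length] else []) ++ pvWts rest := by
  unfold pvWts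
  rw [List.length_cons, List.range_succ_eq_map, List.filter_cons]
  have tail :
      List.map (fun i => (10 : Int) ^ (rest.length + 1 - 1 - i))
        (List.filter (fun i => decide ((x :: rest).getD i 0 > -1))
          ((List.range rest.length).map Nat.succ))
      = List.map (fun i => (10 : Int) ^ (rest.length - 1 - i))
        (List.filter (fun i => decide (rest.getD i 0 > -1)) (List.range rest.length)) := by
    simp only [List.filter_map, List.map_map, Function.comp_def, List.getD_cons_succ]
    apply List.map_congr_left
    intro i _
    congr 1
    omega
  by_cases h : x > -1
  · rw [if_pos (by simp [h]), if_pos h, List.map_cons, tail]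
    simp
  · rw [if_neg (by simp [h]), if_neg h, tail]
    simp

theorem pvFold_map (ws : List Int) (L : List Int) (c : Int) :
    ws.foldl pvStep (L.map (fun t => t + c)) = (ws.foldl pvStep L).map (fun t => t + c) := by
  induction ws generalizing L with
  | nil => rfl
  | cons w ws ih =>
    simp only [List.foldl_cons]
    rw [← ih]
    congr 1
    simp only [pvStep, List.map_append, List.map_map]
    congr 1
    apply List.map_congr_left
    intro t _
    simp [Function.comp]
    ring

theorem pvTot_eq_fold (ll : List Int) (num : Int) :
    pvTot ll num = (pvWts ll).reverse.foldl pvStep [num] := by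
  induction ll generalizing num with
  | nil => rfl
  | cons x rest ih =>
    rw [pvWts_cons, List.reverse_append, List.foldl_append]
    show pvTot (x :: rest) num = _
    unfold pvTot
    split_ifs with h
    · have hw : pvTot rest ((10 : Int) ^ rest.length + num)
          = (pvTot rest num).map (fun t => t + (10 : Int) ^ rest.length) := by
        rw [ih, ih]
        rw [← pvFold_map]
        congr 1
        simp [add_comm]
      rw [hw, ih]
      simp [pvStep]
    · simp [ih]

theorem tempgen_eq_filter (ll : List Int) (num : Int) :
    tempgen ll num = (pvTot ll num).filter (fun t => t ≠ 0) := by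
  induction ll generalizing num with
  | nil =>
    unfold tempgen pvTot
    by_cases h : num = 0 <;> simp [h]
  | cons x rest ih =>
    unfold tempgen pvTot
    split_ifs with h
    · simp only [List.length_cons, Nat.add_sub_cancel, List.filter_append]
      rw [ih, ih]
    · simp only [List.nil_append]
      exact ih num

-- ===== VERDICT (by name: the statement is the Claim_ definition above) =====
theorem tempgen_spec : Claim_equal_tempgen := by
  intro ll num _
  show tempgen ll num = tempgen_alt ll num
  rw [tempgen_eq_filter, pvTot_eq_fold]
  rfl
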